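-- pv_equiv track=rewrite | github.com/michaelpeterhoffmann/temporalRobustness | csv_generator.py | extract_third_column
-- ===== SOURCE A (Python) =====
-- def extract_third_column(line):
--     """Extracts the third column from the line, handling both quoted and non-quoted text."""
--     # Split the line into fields considering possible quoted fields with commas inside
--     fields = []
--     current_field = ''
--     inside_quotes = False
--
--     for char in line:
--         if char == '"' and not inside_quotes:
--             inside_quotes = True
--             current_field += char
--         elif char == '"' and inside_quotes:
--             inside_quotes = False
--             current_field += char
--         elif char == ',' and not inside_quotes:
--             fields.append(current_field.strip())
--             current_field = ''
--         else:
--             current_field += char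
--
--     # Add the last field
--     if current_field:
--         fields.append(current_field.strip())
--
--     # Return the third column
--     if len(fields) >= 3:
--         return fields[2]
--     else:
--         return ""
-- ===== SOURCE B (Python) =====
-- def extract_third_column(line):
--     """Extracts the third column from the line, handling both quoted and non-quoted text."""
--     # Pass 1: indices of commas that are outside quotes.
--     cuts = []
--     inside = False
--     for i, ch in enumerate(line):
--         if ch == '"':
--             inside = not inside
--         elif ch == ',' and not inside:
--             cuts.append(i)
--     # Pass 2: slice the line into raw segments at those indices.
--     bounds = [-1] + cuts + [len(line)]
--     segs = [line[bounds[j] + 1 : bounds[j + 1]] for j in range(len(bounds) - 1)]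
--     # All segments but the last become fields (stripped); the last only if non-empty.
--     fields = [s.strip() for s in segs[:-1]]
--     if segs[-1]:
--         fields.append(segs[-1].strip())
--     return fields[2] if len(fields) >= 3 else ""
-- ===== Notes on version B (the rewrite author's own statement) =====
-- stated objective: alternative
-- what changed: A builds fields in one accumulating scan (growing the current field char by char); B instead first collects the indices of unquoted commas in one quote-toggle pass and then slices the line into segments at those indices, stripping all but the raw last segment which is appended only if non-empty.
import Mathlib
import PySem

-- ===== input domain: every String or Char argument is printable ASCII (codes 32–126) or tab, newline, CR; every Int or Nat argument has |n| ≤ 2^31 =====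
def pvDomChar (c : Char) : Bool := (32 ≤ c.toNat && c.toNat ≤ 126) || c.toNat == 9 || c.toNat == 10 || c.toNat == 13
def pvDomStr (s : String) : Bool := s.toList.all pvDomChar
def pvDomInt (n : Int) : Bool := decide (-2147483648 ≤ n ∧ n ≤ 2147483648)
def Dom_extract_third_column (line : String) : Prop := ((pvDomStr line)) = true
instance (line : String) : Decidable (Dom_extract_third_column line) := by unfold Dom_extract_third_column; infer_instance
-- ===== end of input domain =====

-- B replaces A's single accumulating scan by a locate-then-slice decomposition
-- (pass 1 records the indices of unquoted commas, pass 2 slices the line at them);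
-- objective: alternative decomposition, same exact behaviour.


-- ===== PORT A =====
-- step of A's for-loop: state = (fields, current_field, inside_quotes)
def pvStepA (s : List (List Char) × List Char × Bool) (c : Char) :
    List (List Char) × List Char × Bool :=
  if c = '"' ∧ s.2.2 = false then (s.1, s.2.1 ++ [c], true)
  else if c = '"' ∧ s.2.2 = true then (s.1, s.2.1 ++ [c], false)
  else if c = ',' ∧ s.2.2 = false then (s.1 ++ [PySem.Chars.strip s.2.1], [], s.2.2)
  else (s.1, s.2.1 ++ [c], s.2.2)

def extract_third_column (line : String) : String :=
  let st := line.toList.foldl pvStepA ([], [], false)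
  let fields := if st.2.1 ≠ [] then st.1 ++ [PySem.Chars.strip st.2.1] else st.1
  if 3 ≤ PySem.List.len fields then String.ofList (PySem.List.pyGetD fields 2 []) else ""

-- ===== PORT B =====
-- step of B's pass 1: state = (inside, cuts = indices of unquoted commas)
def pvStepB (s : Bool × List Int) (p : Int × Char) : Bool × List Int :=
  if p.2 = '"' then (!s.1, s.2)
  else if p.2 = ',' ∧ s.1 = false then (s.1, s.2 ++ [p.1])
  else s

def extract_third_column_alt (line : String) : String :=
  let cs := line.toList
  let st := (PySem.List.enumerate cs 0).foldl pvStepB (false, [])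
  let bounds : List Int := [-1] ++ st.2 ++ [PySem.List.len cs]
  let segs := (PySem.List.pyRange 0 (PySem.List.len bounds - 1) 1).map
    (fun j => PySem.List.slice cs (some (PySem.List.pyGetD bounds j 0 + 1))
                                  (some (PySem.List.pyGetD bounds (j + 1) 0)))
  let fields := (PySem.List.slice segs none (some (-1))).map PySem.Chars.strip
  let fields := if PySem.List.pyGetD segs (-1) [] ≠ [] then
      fields ++ [PySem.Chars.strip (PySem.List.pyGetD segs (-1) [])] else fields
  if 3 ≤ PySem.List.len fields then String.ofList (PySem.List.pyGetD fields 2 []) else ""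

-- ===== PRECONDITION & SPEC =====
def Spec_extract_third_column (line : String) (out : String) : Prop := out = extract_third_column_alt line
instance (line : String) (out : String) : Decidable (Spec_extract_third_column line out) := by unfold Spec_extract_third_column; infer_instance

-- ===== CLAIM (what is proved, stated in full; the proofs are below) =====
def Claim_equal_extract_third_column : Prop := ∀ (line : String), Dom_extract_third_column line → Spec_extract_third_column line (extract_third_column line)

-- ===== LEMMAS AND PROOFS =====

-- reference splitter: raw (unstripped) segments of cs between unquoted commas,
-- given the pending partial field cur; returns (finished segments, last segment)
def pvRawSplit (ins : Bool) (cur : List Char) : List Char → List (List Char) × List Char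
  | [] => ([], cur)
  | c :: cs =>
    if c = ',' ∧ ins = false then
      ((cur :: (pvRawSplit ins [] cs).1), (pvRawSplit ins [] cs).2)
    else pvRawSplit (if c = '"' then !ins else ins) (cur ++ [c]) cs

def pvSegList (ins : Bool) (cur : List Char) (cs : List Char) : List (List Char) :=
  (pvRawSplit ins cur cs).1 ++ [(pvRawSplit ins cur cs).2]

def pvMapHead (g : List Char → List Char) : List (List Char) → List (List Char)
  | [] => []
  | x :: xs => g x :: xs

-- relative positions of the unquoted commas
def pvCuts (ins : Bool) : List Char → List Nat
  | [] => []
  | c :: cs =>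
    if c = '"' then (pvCuts (!ins) cs).map (· + 1)
    else if c = ',' ∧ ins = false then 0 :: (pvCuts ins cs).map (· + 1)
    else (pvCuts ins cs).map (· + 1)

-- recursive form of B's slicing comprehension
def pvSegsZ (cs : List Char) (prev : Int) : List Int → List (List Char)
  | [] => []
  | k :: rest => PySem.List.slice cs (some (prev + 1)) (some k) :: pvSegsZ cs k rest

-- the common normal form both ports are reduced to
def pvOut (cs : List Char) : String :=
  let f := (pvRawSplit false [] cs).1.map PySem.Chars.strip
  let l := (pvRawSplit false [] cs).2
  let fields := if l ≠ [] then f ++ [PySem.Chars.strip l] else f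
  if 3 ≤ PySem.List.len fields then String.ofList (PySem.List.pyGetD fields 2 []) else ""

lemma pvFoldA_eq (cs : List Char) : ∀ (fields : List (List Char)) (cur : List Char) (ins : Bool),
    (cs.foldl pvStepA (fields, cur, ins)).1
      = fields ++ ((pvRawSplit ins cur cs).1).map PySem.Chars.strip
    ∧ (cs.foldl pvStepA (fields, cur, ins)).2.1 = (pvRawSplit ins cur cs).2 := by
  induction cs with
  | nil => intro fields cur ins; simp [pvRawSplit]
  | cons c cs ih =>
    intro fields cur ins
    simp only [List.foldl_cons]
    by_cases hq : c = '"'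
    · subst hq
      cases ins
      · simpa [pvStepA, pvRawSplit] using ih fields (cur ++ ['"']) true
      · simpa [pvStepA, pvRawSplit] using ih fields (cur ++ ['"']) false
    · by_cases hc : c = ','
      · subst hc
        cases ins
        · simpa [pvStepA, pvRawSplit, hq] using ih (fields ++ [PySem.Chars.strip cur]) [] false
        · simpa [pvStepA, pvRawSplit, hq] using ih fields (cur ++ [',']) true
      · cases ins
        · simpa [pvStepA, pvRawSplit, hq, hc] using ih fields (cur ++ [c]) false
        · simpa [pvStepA, pvRawSplit, hq, hc] using ih fields (cur ++ [c]) true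

lemma pvMapShift (l : List Nat) (s : Int) :
    (l.map (· + 1)).map (fun k : Nat => s + (k : Int)) = l.map (fun k : Nat => (s + 1) + (k : Int)) := by
  rw [List.map_map]
  apply List.map_congr_left
  intro k _
  simp only [Function.comp_apply]
  push_cast
  ring

lemma pvFoldB_eq (cs : List Char) : ∀ (ins : Bool) (acc : List Int) (s : Int),
    ((PySem.List.enumerate cs s).foldl pvStepB (ins, acc)).2
      = acc ++ (pvCuts ins cs).map (fun k : Nat => s + (k : Int)) := by
  induction cs with
  | nil => intro ins acc s; simp [PySem.List.enumerate_nil, pvCuts]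
  | cons c cs ih =>
    intro ins acc s
    rw [PySem.List.enumerate_cons, List.foldl_cons]
    by_cases hq : c = '"'
    · subst hq
      rw [show pvStepB (ins, acc) (s, '"') = (!ins, acc) from by simp [pvStepB]]
      rw [show pvCuts ins ('"'::cs) = (pvCuts (!ins) cs).map (· + 1) from by simp [pvCuts]]
      rw [ih (!ins) acc (s+1), pvMapShift]
    · by_cases hc : c = ',' ∧ ins = false
      · obtain ⟨hc1, hc2⟩ := hc
        subst hc1 hc2
        rw [show pvStepB (false, acc) (s, ',') = (false, acc ++ [s]) from by simp [pvStepB]]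
        rw [show pvCuts false (','::cs) = 0 :: (pvCuts false cs).map (· + 1) from by simp [pvCuts]]
        rw [ih false (acc ++ [s]) (s+1)]
        rw [List.map_cons, pvMapShift]
        simp
      · rw [show pvStepB (ins, acc) (s, c) = (ins, acc) from by simp [pvStepB, hq, hc]]
        rw [show pvCuts ins (c::cs) = (pvCuts ins cs).map (· + 1) from by
          by_cases h : c = '"'
          · exact absurd h hq
          · simp [pvCuts, h, hc]]
        rw [ih ins acc (s+1), pvMapShift]

lemma pvBridge (rest : List Int) : ∀ (prev : Int) (cs : List Char),
    ((PySem.List.pyRange 0 (rest.length : Int) 1).map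
      (fun j => PySem.List.slice cs (some (PySem.List.pyGetD (prev :: rest) j 0 + 1))
                                    (some (PySem.List.pyGetD (prev :: rest) (j + 1) 0))))
      = pvSegsZ cs prev rest := by
  induction rest with
  | nil => intro prev cs; simp [PySem.List.pyRange_one_eq_nil, pvSegsZ]
  | cons k r ih =>
    intro prev cs
    rw [show (((k :: r).length : Nat) : Int) = ((r.length : Int) + 1) by push_cast [List.length_cons]; ring]
    rw [PySem.List.pyRange_one_cons (by positivity)]
    rw [List.map_cons]
    rw [pvSegsZ]
    congr 1
    · have h0 : PySem.List.pyGetD (prev :: k :: r) 0 0 = prev := by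
        simp
      have h1 : PySem.List.pyGetD (prev :: k :: r) (0 + 1) 0 = k := by
        simpa using PySem.List.pyGetD_natCast (prev :: k :: r) 1 0
      rw [h0, h1]
    · rw [← ih k cs]
      rw [PySem.List.pyRange_one, PySem.List.pyRange_one]
      rw [List.map_map, List.map_map]
      norm_num
      intro i _
      have e1 : (1 : Int) + (i : Int) = ((i + 1 : Nat) : Int) := by push_cast; ring
      have e2 : ((i + 1 : Nat) : Int) + 1 = ((i + 2 : Nat) : Int) := by push_cast; ring
      have e4 : (i : Int) + 1 = ((i + 1 : Nat) : Int) := by push_cast; ring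
      simp only [e1, e2, e4, PySem.List.pyGetD_natCast, List.getD_cons_succ]
      simp [List.getD]

lemma pvSliceShift (c : Char) (cs : List Char) (a b : Int) (ha : 0 ≤ a) (hb : 0 ≤ b) :
    PySem.List.slice (c :: cs) (some (a + 1)) (some (b + 1)) = PySem.List.slice cs (some a) (some b) := by
  rw [PySem.List.slice_toNat _ (by omega) (by omega), PySem.List.slice_toNat _ ha hb]
  rw [show (a + 1).toNat = a.toNat + 1 by omega]
  rw [List.drop_succ_cons]
  congr 1
  omega

lemma pvSliceZeroCons (c : Char) (cs : List Char) (b : Int) (hb : 0 ≤ b) :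
    PySem.List.slice (c :: cs) (some 0) (some (b + 1)) = c :: PySem.List.slice cs (some 0) (some b) := by
  rw [PySem.List.slice_toNat _ (by omega) (by omega), PySem.List.slice_toNat _ (by omega) hb]
  rw [show (b + 1).toNat = b.toNat + 1 by omega]
  simp [List.take_succ_cons]

lemma pvSegsZ_shift (c : Char) (cs : List Char) : ∀ (rest : List Int), (∀ x ∈ rest, 0 ≤ x) →
    ∀ (prev : Int), -1 ≤ prev →
    pvSegsZ (c :: cs) (prev + 1) (rest.map (· + 1)) = pvSegsZ cs prev rest := by
  intro rest
  induction rest with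
  | nil => intro _ prev _; simp [pvSegsZ]
  | cons k r ih =>
    intro h prev hp
    have hk : (0:Int) ≤ k := h k (by simp)
    simp only [List.map_cons, pvSegsZ]
    congr 1
    · exact pvSliceShift c cs (prev + 1) k (by omega) hk
    · exact ih (fun x hx => h x (by simp [hx])) k (by omega)

lemma pvRawSplit_cons (cs : List Char) : ∀ (ins : Bool) (cur : List Char) (a : Char),
    pvSegList ins (a :: cur) cs = pvMapHead (a :: ·) (pvSegList ins cur cs) := by
  induction cs with
  | nil => intro ins cur a; simp [pvSegList, pvRawSplit, pvMapHead]
  | cons c cs ih =>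
    intro ins cur a
    by_cases hc : c = ',' ∧ ins = false
    · simp [pvSegList, pvRawSplit, hc, pvMapHead]
    · have e : ∀ cur', pvRawSplit ins cur' (c :: cs)
          = pvRawSplit (if c = '"' then !ins else ins) (cur' ++ [c]) cs := by
        intro cur'; rw [pvRawSplit, if_neg hc]
      unfold pvSegList
      rw [e (a :: cur), e cur]
      rw [show (a :: cur) ++ [c] = a :: (cur ++ [c]) from rfl]
      exact ih (if c = '"' then !ins else ins) (cur ++ [c]) a

lemma pvCastShift (l : List Nat) :
    (l.map (· + 1)).map (fun k : Nat => (k : Int)) = (l.map (fun k : Nat => (k : Int))).map (· + 1) := by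
  rw [List.map_map, List.map_map]
  apply List.map_congr_left
  intro k _
  simp only [Function.comp_apply]
  push_cast
  ring

lemma pvMain (cs : List Char) : ∀ (ins : Bool),
    pvSegsZ cs (-1) ((pvCuts ins cs).map (fun k : Nat => (k : Int)) ++ [PySem.List.len cs])
      = pvSegList ins [] cs := by
  induction cs with
  | nil =>
    intro ins
    simp [pvCuts, pvSegsZ, pvSegList, pvRawSplit, PySem.List.len_eq, PySem.List.slice]
  | cons c cs ih =>
    intro ins
    have hlen : PySem.List.len (c :: cs) = PySem.List.len cs + 1 := by
      simp [PySem.List.len_eq]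
    by_cases hc : c = ',' ∧ ins = false
    · obtain ⟨hc1, hc2⟩ := hc
      subst hc1 hc2
      rw [show pvCuts false (',' :: cs) = 0 :: (pvCuts false cs).map (· + 1) from by simp [pvCuts]]
      rw [List.map_cons, pvCastShift, hlen, List.cons_append]
      rw [show ((pvCuts false cs).map (fun k : Nat => (k : Int))).map (· + 1) ++ [PySem.List.len cs + 1]
            = (((pvCuts false cs).map (fun k : Nat => (k : Int))) ++ [PySem.List.len cs]).map (· + 1) from by
        simp]
      rw [pvSegsZ]
      rw [show ((0:Nat) : Int) = (-1 : Int) + 1 from by norm_num]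
      rw [pvSegsZ_shift ',' cs _ (by
        intro x hx
        rcases List.mem_append.mp hx with h | h
        · obtain ⟨k, _, rfl⟩ := List.mem_map.mp h; positivity
        · simp at h; subst h; simp) (-1) (by norm_num)]
      rw [ih false]
      rw [show pvSegList false [] (',' :: cs) = [] :: pvSegList false [] cs from by
        unfold pvSegList; rw [pvRawSplit]; simp]
      congr 1
    · have hins : pvRawSplit ins [] (c :: cs) = pvRawSplit (if c = '"' then !ins else ins) [c] cs := by
        rw [pvRawSplit, if_neg hc]; simp
      have hcuts : pvCuts ins (c :: cs) = (pvCuts (if c = '"' then !ins else ins) cs).map (· + 1) := by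
        by_cases hq : c = '"'
        · simp [pvCuts, hq]
        · simp [pvCuts, hq, hc]
      rw [hcuts, pvCastShift, hlen]
      rcases hr : (pvCuts (if c = '"' then !ins else ins) cs).map (fun k : Nat => (k : Int)) ++ [PySem.List.len cs]
        with _ | ⟨k0, r⟩
      · exact absurd hr (by simp)
      have hnn : ∀ x ∈ k0 :: r, (0:Int) ≤ x := by
        rw [← hr]
        intro x hx
        rcases List.mem_append.mp hx with h | h
        · obtain ⟨k, _, rfl⟩ := List.mem_map.mp h; positivity
        · simp at h; subst h; simp
      have hk0 : (0:Int) ≤ k0 := hnn k0 (by simp)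
      rw [show ((pvCuts (if c = '"' then !ins else ins) cs).map (fun k : Nat => (k : Int))).map (· + 1)
            ++ [PySem.List.len cs + 1] = ((k0 :: r).map (· + 1)) from by rw [← hr]; simp]
      rw [List.map_cons, pvSegsZ]
      rw [show (-1 : Int) + 1 = 0 from by norm_num]
      rw [pvSliceZeroCons c cs k0 hk0]
      rw [show (k0 + 1 : Int) = k0 + 1 from rfl]
      rw [pvSegsZ_shift c cs r (fun x hx => hnn x (by simp [hx])) k0 (by omega)]
      have golden : pvSegsZ cs (-1) (k0 :: r) = pvSegList (if c = '"' then !ins else ins) [] cs := by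
        rw [← hr, ih]
      rw [pvSegsZ] at golden
      rw [show (-1 : Int) + 1 = 0 from by norm_num] at golden
      unfold pvSegList
      rw [hins]
      rw [show ([c] : List Char) = c :: [] from rfl]
      rw [show (pvRawSplit (if c = '"' then !ins else ins) (c :: []) cs).1
            ++ [(pvRawSplit (if c = '"' then !ins else ins) (c :: []) cs).2]
            = pvSegList (if c = '"' then !ins else ins) (c :: []) cs from rfl]
      rw [pvRawSplit_cons cs (if c = '"' then !ins else ins) [] c]
      rw [← golden]
      simp [pvMapHead]

lemma pvA_eq (line : String) : extract_third_column line = pvOut line.toList := by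
  obtain ⟨h1, h2⟩ := pvFoldA_eq line.toList [] [] false
  simp only [List.nil_append] at h1
  unfold extract_third_column pvOut
  simp only [h1, h2]

lemma pvB_eq (line : String) : extract_third_column_alt line = pvOut line.toList := by
  have hfold := pvFoldB_eq line.toList false [] 0
  simp only [List.nil_append] at hfold
  have hcast : (pvCuts false line.toList).map (fun k : Nat => (0:Int) + (k : Int))
      = (pvCuts false line.toList).map (fun k : Nat => (k : Int)) := by
    apply List.map_congr_left; intro k _; ring
  rw [hcast] at hfold
  have hb : ([(-1:Int)] ++ (pvCuts false line.toList).map (fun k : Nat => (k : Int)))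
        ++ [PySem.List.len line.toList]
      = (-1 : Int) :: ((pvCuts false line.toList).map (fun k : Nat => (k : Int))
        ++ [PySem.List.len line.toList]) := by
    simp
  have hlen2 : PySem.List.len ((-1 : Int) :: ((pvCuts false line.toList).map (fun k : Nat => (k : Int))
        ++ [PySem.List.len line.toList])) - 1
      = ((((pvCuts false line.toList).map (fun k : Nat => (k : Int))
        ++ [PySem.List.len line.toList]).length : Nat) : Int) := by
    simp [PySem.List.len_eq]
  unfold extract_third_column_alt pvOut
  simp only [hfold, hb, hlen2, pvBridge, pvMain]
  unfold pvSegList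
  rw [PySem.List.slice_to_neg_one, List.dropLast_concat]
  rw [PySem.List.pyGetD_neg_one_append_singleton]

-- ===== VERDICT (by name: the statement is the Claim_ definition above) =====
theorem extract_third_column_spec : Claim_equal_extract_third_column := by
  intro line _
  unfold Spec_extract_third_column
  rw [pvA_eq, pvB_eq]
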